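-- pv_equiv track=rewrite | github.com/slimissa/cagoule-bench | venv/lib/python3.12/site-packages/cagoule/matrix.py | matrix_vec_mul_mod_optimized
-- ===== SOURCE A (Python) =====
-- Matrix = list[list[int]]
--
-- def matrix_vec_mul_mod_optimized(m: Matrix, v: list[int], p: int) -> list[int]:
--     """
--     Produit matrice-vecteur M × v mod p (version optimisée).
--     Utilise des variables locales pour réduire les accès.
--     """
--     n = len(m)
--     result = [0] * n
--     for i in range(n):
--         row = m[i]
--         s = 0
--         # Déroulage partiel de la boucle pour n=16
--         if n == 16:
--             s = (row[0] * v[0] + row[1] * v[1] + row[2] * v[2] + row[3] * v[3] +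
--                  row[4] * v[4] + row[5] * v[5] + row[6] * v[6] + row[7] * v[7] +
--                  row[8] * v[8] + row[9] * v[9] + row[10] * v[10] + row[11] * v[11] +
--                  row[12] * v[12] + row[13] * v[13] + row[14] * v[14] + row[15] * v[15]) % p
--         else:
--             for j in range(n):
--                 s += row[j] * v[j]
--             s %= p
--         result[i] = s
--     return result
-- ===== SOURCE B (Python) =====
-- def matrix_vec_mul_mod_optimized(m, v, p):
--     """Column-oriented accumulation: for each column j, add m[i][j]*v[j] into
--     result[i]; then take every entry mod p in one final pass."""
--     n = len(m)
--     result = [0] * n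
--     for j in range(n):
--         vj = v[j]
--         for i in range(n):
--             result[i] += m[i][j] * vj
--     for i in range(n):
--         result[i] %= p
--     return result
-- ===== Notes on version B (the rewrite author's own statement) =====
-- stated objective: alternative
-- what changed: Replaces the row-wise dot products (with a hand-unrolled special case for n=16) by a column-oriented accumulation into a result array, with a single final mod pass; the unrolling is dropped.
import Mathlib
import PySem

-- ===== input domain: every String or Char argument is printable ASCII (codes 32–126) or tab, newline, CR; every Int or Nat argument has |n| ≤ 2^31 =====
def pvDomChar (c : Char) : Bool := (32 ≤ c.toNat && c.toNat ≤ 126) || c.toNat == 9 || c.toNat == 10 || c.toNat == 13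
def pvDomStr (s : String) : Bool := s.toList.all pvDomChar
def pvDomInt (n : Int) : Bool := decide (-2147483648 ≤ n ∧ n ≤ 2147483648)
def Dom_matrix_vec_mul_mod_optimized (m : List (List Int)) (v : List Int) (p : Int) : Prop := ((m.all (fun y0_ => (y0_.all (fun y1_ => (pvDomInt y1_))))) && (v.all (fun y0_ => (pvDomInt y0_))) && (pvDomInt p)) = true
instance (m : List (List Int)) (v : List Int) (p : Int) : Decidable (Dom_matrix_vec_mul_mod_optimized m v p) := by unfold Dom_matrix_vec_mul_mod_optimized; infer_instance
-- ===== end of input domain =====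

-- B replaces A's row-wise dot products (with a hand-unrolled n=16 case) by a
-- column-oriented accumulation with one final mod pass (alternative decomposition).

-- ===== PORT A =====
def matrix_vec_mul_mod_optimized (m : List (List Int)) (v : List Int) (p : Int) : List Int :=
  let n := m.length
  (List.range n).map (fun i =>
    let row := m.getD i []
    if n = 16 then
      PySem.Int.mod (row.getD 0 0 * v.getD 0 0 + row.getD 1 0 * v.getD 1 0 +
        row.getD 2 0 * v.getD 2 0 + row.getD 3 0 * v.getD 3 0 +
        row.getD 4 0 * v.getD 4 0 + row.getD 5 0 * v.getD 5 0 +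
        row.getD 6 0 * v.getD 6 0 + row.getD 7 0 * v.getD 7 0 +
        row.getD 8 0 * v.getD 8 0 + row.getD 9 0 * v.getD 9 0 +
        row.getD 10 0 * v.getD 10 0 + row.getD 11 0 * v.getD 11 0 +
        row.getD 12 0 * v.getD 12 0 + row.getD 13 0 * v.getD 13 0 +
        row.getD 14 0 * v.getD 14 0 + row.getD 15 0 * v.getD 15 0) p
    else
      PySem.Int.mod ((List.range n).foldl (fun s j => s + row.getD j 0 * v.getD j 0) 0) p)

-- ===== PORT B =====
def matrix_vec_mul_mod_optimized_alt (m : List (List Int)) (v : List Int) (p : Int) : List Int :=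
  let n := m.length
  let result := (List.range n).foldl (fun result j =>
      let vj := v.getD j 0
      (List.range n).foldl (fun r i => r.set i (r.getD i 0 + (m.getD i []).getD j 0 * vj)) result)
    (List.replicate n 0)
  result.map (fun x => PySem.Int.mod x p)

-- ===== PRECONDITION & SPEC =====
-- Pre_ excludes exactly the inputs on which the Python A raises: p = 0 with a
-- nonempty matrix (ZeroDivisionError), or a row of m or the vector v shorter
-- than len(m) (IndexError).
def Pre_matrix_vec_mul_mod_optimized (m : List (List Int)) (v : List Int) (p : Int) : Prop :=
  m = [] ∨ (p ≠ 0 ∧ m.length ≤ v.length ∧ ∀ row ∈ m, m.length ≤ row.length)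
instance (m : List (List Int)) (v : List Int) (p : Int) : Decidable (Pre_matrix_vec_mul_mod_optimized m v p) := by unfold Pre_matrix_vec_mul_mod_optimized; infer_instance

def pvWitness_matrix_vec_mul_mod_optimized : List (List Int) × List Int × Int := ([[1, 2], [3, 4]], [5, 6], 7)

def Spec_matrix_vec_mul_mod_optimized (m : List (List Int)) (v : List Int) (p : Int) (out : List Int) : Prop := out = matrix_vec_mul_mod_optimized_alt m v p
instance (m : List (List Int)) (v : List Int) (p : Int) (out : List Int) : Decidable (Spec_matrix_vec_mul_mod_optimized m v p out) := by unfold Spec_matrix_vec_mul_mod_optimized; infer_instance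

-- ===== CLAIM (what is proved, stated in full; the proofs are below) =====
def Claim_equal_matrix_vec_mul_mod_optimized : Prop := ∀ (m : List (List Int)) (v : List Int) (p : Int), Dom_matrix_vec_mul_mod_optimized m v p → Pre_matrix_vec_mul_mod_optimized m v p → Spec_matrix_vec_mul_mod_optimized m v p (matrix_vec_mul_mod_optimized m v p)

-- ===== LEMMAS AND PROOFS =====

-- The inner column-update fold of B: setting indices 0..k-1 rewrites the first
-- k entries pointwise and leaves the tail untouched.
theorem pv_inner_fold (f : Nat → Int) (k : Nat) (r : List Int) (hk : k ≤ r.length) :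
    (List.range k).foldl (fun r i => r.set i (r.getD i 0 + f i)) r
      = (List.range k).map (fun i => r.getD i 0 + f i) ++ r.drop k := by
  induction k with
  | zero => simp
  | succ k ih =>
    have hk' : k < r.length := by omega
    rw [List.range_succ, List.foldl_append, List.map_append, ih (by omega)]
    simp only [List.foldl_cons, List.foldl_nil, List.map_cons, List.map_nil]
    have hlen : ((List.range k).map (fun i => r.getD i 0 + f i)).length = k := by simp
    have hdrop : r.drop k = r[k] :: r.drop (k + 1) := List.drop_eq_getElem_cons hk'
    rw [hdrop]
    have hget : (((List.range k).map (fun i => r.getD i 0 + f i)) ++ r[k] :: r.drop (k + 1)).getD k 0 = r[k] := by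
      simp [List.getD, List.getElem?_append_right, List.getElem?_eq_getElem hk']
    rw [hget, List.set_append]
    rw [if_neg (by omega : ¬ k < ((List.range k).map (fun i => r.getD i 0 + f i)).length)]
    rw [hlen, Nat.sub_self]
    simp [List.getD, List.getElem?_eq_getElem hk']
    rw [hdrop]
    rfl
theorem pv_getD_map_range (g : Nat → Int) (n i : Nat) (h : i < n) :
    ((List.range n).map g).getD i 0 = g i := by
  simp [List.getD_eq_getElem?_getD, List.getElem?_map, List.getElem?_range h]

-- The outer fold of B accumulates, for each row i, the partial dot product over
-- the columns processed so far.
theorem pv_outer_fold (m : List (List Int)) (v : List Int) (jk : Nat) :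
    (List.range jk).foldl (fun result j =>
        (List.range m.length).foldl
          (fun r i => r.set i (r.getD i 0 + (m.getD i []).getD j 0 * v.getD j 0)) result)
      (List.replicate m.length 0)
      = (List.range m.length).map (fun i =>
          (List.range jk).foldl (fun s j => s + (m.getD i []).getD j 0 * v.getD j 0) 0) := by
  induction jk with
  | zero => simp [List.map_const']
  | succ jk ih =>
    rw [List.range_succ, List.foldl_append, ih]
    simp only [List.foldl_cons, List.foldl_nil]
    rw [pv_inner_fold (fun i => (m.getD i []).getD jk 0 * v.getD jk 0) m.length _ (by simp)]
    rw [List.drop_eq_nil_of_le (by simp), List.append_nil]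
    apply List.map_congr_left
    intro i hi
    have hi' : i < m.length := List.mem_range.mp hi
    rw [pv_getD_map_range _ _ _ hi']
    simp

theorem pv_main (m : List (List Int)) (v : List Int) (p : Int) :
    matrix_vec_mul_mod_optimized m v p = matrix_vec_mul_mod_optimized_alt m v p := by
  simp only [matrix_vec_mul_mod_optimized, matrix_vec_mul_mod_optimized_alt]
  rw [pv_outer_fold, List.map_map]
  apply List.map_congr_left
  intro i hi
  by_cases h16 : m.length = 16
  · rw [if_pos h16, h16]
    have hr : List.range 16 = [0,1,2,3,4,5,6,7,8,9,10,11,12,13,14,15] := rfl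
    rw [hr]
    congr 1
    simp only [List.foldl_cons, List.foldl_nil]
    ring
  · rw [if_neg h16]
    rfl

-- ===== VERDICT (by name: the statement is the Claim_ definition above) =====
theorem matrix_vec_mul_mod_optimized_spec : Claim_equal_matrix_vec_mul_mod_optimized := by
  intro m v p _ _
  exact pv_main m v p
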